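-- pv_equiv track=rewrite | github.com/netham45/screamrouter | screamrouter/api/timeshift_client.py | _extract_filename
-- ===== SOURCE A (Python) =====
-- from typing import Optional
--
-- def _extract_filename(disposition: Optional[str]) -> str:
--     if not disposition:
--         return "timeshift.pcm"
--     parts = (segment.strip() for segment in disposition.split(";"))
--     for part in parts:
--         if part.lower().startswith("filename="):
--             _, _, value = part.partition("=")
--             return value.strip('"') or "timeshift.pcm"
--     return "timeshift.pcm"
-- ===== SOURCE B (Python) =====
-- from typing import Optional
--
-- def _extract_filename(disposition: Optional[str]) -> str:
--     if not disposition: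
--         return "timeshift.pcm"
--     params = {}
--     for segment in disposition.split(";"):
--         key, sep, value = segment.strip().partition("=")
--         if sep:
--             params.setdefault(key.lower(), value)
--     value = params.get("filename")
--     if value is None:
--         return "timeshift.pcm"
--     return value.strip('"') or "timeshift.pcm"
-- ===== Notes on version B (the rewrite author's own statement) =====
-- stated objective: alternative
-- what changed: B parses the whole header once into a dict of parameters (first occurrence kept via setdefault, keys lowercased, only segments containing '=') and then looks up 'filename', replacing A's scan-with-early-return over prefix-matched segments.
import Mathlib
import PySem

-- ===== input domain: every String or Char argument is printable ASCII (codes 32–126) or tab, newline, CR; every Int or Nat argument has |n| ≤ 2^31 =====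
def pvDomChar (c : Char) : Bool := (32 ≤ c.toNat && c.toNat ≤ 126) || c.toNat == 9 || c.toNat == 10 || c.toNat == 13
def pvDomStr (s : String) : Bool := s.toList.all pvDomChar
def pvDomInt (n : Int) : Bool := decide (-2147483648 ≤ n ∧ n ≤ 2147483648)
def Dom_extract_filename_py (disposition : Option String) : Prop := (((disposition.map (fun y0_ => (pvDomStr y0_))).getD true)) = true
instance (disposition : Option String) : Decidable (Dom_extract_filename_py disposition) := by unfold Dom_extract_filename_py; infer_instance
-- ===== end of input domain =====

-- B builds a dict of all header parameters once (setdefault keeps the first occurrence) and then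
-- looks up "filename", instead of A's scan-with-early-return; alternative decomposition, same cost.


-- ===== PORT A =====
-- hand port of Python's str.partition("=") (PySem has no partition): returns
-- (text before the first '=', whether a '=' was found, text after it); exact — Python's
-- s.partition("=") is (before, "=", after) when found and (s, "", "") when not.
def pyPartitionEq : List Char → List Char × Bool × List Char
  | [] => ([], false, [])
  | c :: cs =>
      if c = '=' then ([], true, cs)
      else
        let r := pyPartitionEq cs
        (c :: r.1, r.2.1, r.2.2)

-- A's for-loop over the ';'-segments, with its early return
def extractLoopA : List (List Char) → String
  | [] => "timeshift.pcm"
  | seg :: rest =>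
      let part := PySem.Chars.strip seg
      if PySem.Chars.startswith (PySem.Chars.lower part) "filename=".toList then
        let value := (pyPartitionEq part).2.2
        let r := PySem.Chars.stripChars value "\"".toList
        if r = [] then "timeshift.pcm" else String.ofList r
      else extractLoopA rest

def extract_filename_py (disposition : Option String) : String :=
  match disposition with
  | none => "timeshift.pcm"
  | some s =>
      if s = "" then "timeshift.pcm"
      else extractLoopA (PySem.Chars.splitOn s.toList ";".toList)

-- ===== PORT B =====
-- B's parameter-dict build step: store key.lower() -> value for each segment containing '='
def paramStep (d : PySem.Dict (List Char) (List Char)) (seg : List Char) :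
    PySem.Dict (List Char) (List Char) :=
  let r := pyPartitionEq (PySem.Chars.strip seg)
  if r.2.1 then d.setdefault (PySem.Chars.lower r.1) r.2.2 else d

def extract_filename_py_alt (disposition : Option String) : String :=
  match disposition with
  | none => "timeshift.pcm"
  | some s =>
      if s = "" then "timeshift.pcm"
      else
        let params := (PySem.Chars.splitOn s.toList ";".toList).foldl paramStep ∅
        match params.get? "filename".toList with
        | none => "timeshift.pcm"
        | some v =>
            let r := PySem.Chars.stripChars v "\"".toList
            if r = [] then "timeshift.pcm" else String.ofList r

-- ===== PRECONDITION & SPEC =====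
def Spec_extract_filename_py (disposition : Option String) (out : String) : Prop := out = extract_filename_py_alt disposition
instance (disposition : Option String) (out : String) : Decidable (Spec_extract_filename_py disposition out) := by unfold Spec_extract_filename_py; infer_instance

-- ===== CLAIM (what is proved, stated in full; the proofs are below) =====
def Claim_equal_extract_filename_py : Prop := ∀ (disposition : Option String), Dom_extract_filename_py disposition → Spec_extract_filename_py disposition (extract_filename_py disposition)

-- ===== LEMMAS AND PROOFS =====

-- the first segment A's loop accepts, as an option (its partition value)
def firstA? : List (List Char) → Option (List Char)
  | [] => none
  | seg :: rest =>
      let part := PySem.Chars.strip seg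
      if PySem.Chars.startswith (PySem.Chars.lower part) "filename=".toList then
        some (pyPartitionEq part).2.2
      else firstA? rest

theorem loopA_eq (segs : List (List Char)) :
    extractLoopA segs =
      match firstA? segs with
      | none => "timeshift.pcm"
      | some v =>
          let r := PySem.Chars.stripChars v "\"".toList
          if r = [] then "timeshift.pcm" else String.ofList r := by
  induction segs with
  | nil => rfl
  | cons seg rest ih =>
      simp only [extractLoopA, firstA?]
      by_cases h : PySem.Chars.startswith (PySem.Chars.lower (PySem.Chars.strip seg)) ['f','i','l','e','n','a','m','e','='] = true
      · simp [h]
      · simp [h, ih]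

theorem lowerChar_ne_eq {c : Char} (hc : c ≠ '=') : PySem.Chars.lowerChar c ≠ '=' := by
  unfold PySem.Chars.lowerChar PySem.Chars.isupper
  split_ifs with h
  · rw [Bool.and_eq_true, decide_eq_true_iff, decide_eq_true_iff] at h
    have hA : 65 ≤ c.toNat := h.1
    have hZ : c.toNat ≤ 90 := h.2
    intro habs
    have hv : (Char.ofNat (c.toNat + 32)).toNat = c.toNat + 32 := by
      unfold Char.ofNat
      rw [dif_pos (Or.inl (by omega : c.toNat + 32 < 55296))]
      rfl
    rw [habs] at hv
    have : (61 : Nat) = c.toNat + 32 := hv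
    omega
  · exact hc

theorem cond_gen (pat : List Char) (hpat : '=' ∉ pat) (cs : List Char) :
    PySem.Chars.startswith (PySem.Chars.lower cs) (pat ++ ['=']) =
      ((pyPartitionEq cs).2.1 && (PySem.Chars.lower (pyPartitionEq cs).1 == pat)) := by
  induction cs generalizing pat with
  | nil =>
      cases pat <;> simp [PySem.Chars.startswith, PySem.Chars.lower, pyPartitionEq]
  | cons c cs ih =>
      by_cases hc : c = '='
      · subst hc
        have hlq : PySem.Chars.lowerChar '=' = '=' := by decide
        cases pat with
        | nil =>
            simp [PySem.Chars.startswith, PySem.Chars.lower, pyPartitionEq, List.isPrefixOf, hlq]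
        | cons p pat' =>
            have hp : p ≠ '=' := fun h => hpat (h ▸ List.mem_cons_self ..)
            simp [PySem.Chars.startswith, PySem.Chars.lower, pyPartitionEq, List.isPrefixOf,
              hlq, hp]
      · have hl := lowerChar_ne_eq hc
        cases pat with
        | nil =>
            simp [PySem.Chars.startswith, PySem.Chars.lower, pyPartitionEq, List.isPrefixOf,
              hc, Ne.symm hl]
        | cons p pat' =>
            have hpat' : '=' ∉ pat' := fun h => hpat (List.mem_cons_of_mem _ h)
            have ihx := ih pat' hpat'
            simp only [PySem.Chars.lower, List.map] at ihx ⊢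
            simp only [pyPartitionEq, if_neg hc]
            simp only [PySem.Chars.startswith, List.cons_append, List.isPrefixOf] at ihx ⊢
            rw [ihx]
            by_cases h1 : PySem.Chars.lowerChar c = p
            · subst h1
              cases (pyPartitionEq cs).2.1 <;> simp
            · have h1' : (PySem.Chars.lowerChar c == p) = false := beq_eq_false_iff_ne.mpr h1
              cases (pyPartitionEq cs).2.1 <;> simp [h1', Ne.symm h1]

theorem cond_eq (cs : List Char) :
    PySem.Chars.startswith (PySem.Chars.lower cs) "filename=".toList =
      ((pyPartitionEq cs).2.1 && (PySem.Chars.lower (pyPartitionEq cs).1 == "filename".toList)) := by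
  have h := cond_gen "filename".toList (by decide) cs
  simpa using h

theorem fold_lookup (segs : List (List Char)) (d : PySem.Dict (List Char) (List Char)) :
    (segs.foldl paramStep d).get? "filename".toList =
      match d.get? "filename".toList with
      | some v => some v
      | none => firstA? segs := by
  induction segs generalizing d with
  | nil =>
      simp only [List.foldl_nil, firstA?]
      cases hd : d.get? "filename".toList <;> simp
  | cons seg rest ih =>
      rw [List.foldl_cons, ih]
      simp only [firstA?]
      rw [cond_eq]
      set p := PySem.Chars.strip seg with hp
      by_cases hb : (pyPartitionEq p).2.1 = true
      · by_cases hk : PySem.Chars.lower (pyPartitionEq p).1 = "filename".toList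
        · have hstep : paramStep d seg = d.setdefault ("filename".toList) (pyPartitionEq p).2.2 := by
            simp [paramStep, ← hp, hb, hk]
          rw [hstep, PySem.Dict.get?_setdefault_self]
          rw [if_pos (by simp [hb]; simpa using hk)]
          cases d.get? "filename".toList <;> simp [Option.getD]
        · have hstep : paramStep d seg =
              d.setdefault (PySem.Chars.lower (pyPartitionEq p).1) (pyPartitionEq p).2.2 := by
            simp [paramStep, ← hp, hb]
          rw [hstep, PySem.Dict.get?_setdefault_of_ne _ _ (fun h => hk h.symm)]
          rw [if_neg (by simp [hb]; simpa using hk)]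
      · have hb' : (pyPartitionEq p).2.1 = false := Bool.eq_false_iff.mpr hb
        have hstep : paramStep d seg = d := by
          simp [paramStep, ← hp, hb']
        rw [hstep, if_neg (by simp [hb'])]

-- ===== VERDICT (by name: the statement is the Claim_ definition above) =====
theorem extract_filename_py_spec : Claim_equal_extract_filename_py := by
  intro disposition _
  unfold Spec_extract_filename_py extract_filename_py extract_filename_py_alt
  cases disposition with
  | none => rfl
  | some s =>
      by_cases hs : s = ""
      · simp [hs]
      · simp only [if_neg hs]
        rw [loopA_eq, fold_lookup]
        have hempty : (∅ : PySem.Dict (List Char) (List Char)).get? "filename".toList = none := rfl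
        rw [hempty]
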